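-- pv_equiv track=rewrite | github.com/rudidev08/x4-foundations-version-diff | src/03_chunk.py | assign_hunks_to_entities
-- ===== SOURCE A (Python) =====
-- def assign_hunks_to_entities(
--     hunks: list[tuple[int, int, str]],
--     intervals: list[tuple[int, int, str]],
--     preamble_key: str,
-- ) -> list[tuple[str, tuple[int, int, str]]]:
--     """Map each hunk to the smallest-range interval that fully contains it.
--
--     Hunks outside all intervals map to `preamble_key`. Returns an ordered list
--     preserving hunk order: [(entity_key, hunk), ...].
--     """
--     out: list[tuple[str, tuple[int, int, str]]] = []
--     for hunk in hunks:
--         hs, he, _ = hunk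
--         best: tuple[int, int, str] | None = None
--         best_range = None
--         for istart, iend, key in intervals:
--             if istart <= hs and he <= iend:
--                 span = iend - istart
--                 if best_range is None or span < best_range:
--                     best = (istart, iend, key)
--                     best_range = span
--         if best is None:
--             out.append((preamble_key, hunk))
--         else:
--             out.append((best[2], hunk))
--     return out
-- ===== SOURCE B (Python) =====
-- def assign_hunks_to_entities(
--     hunks: list[tuple[int, int, str]],
--     intervals: list[tuple[int, int, str]],
--     preamble_key: str,
-- ) -> list[tuple[str, tuple[int, int, str]]]:
--     """Sort the intervals once by span (stable, ascending); then the smallest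
--     containing interval of a hunk is simply the FIRST containing one in that
--     order (stability reproduces A's first-wins tie-break), found with an
--     early-exit scan instead of A's full min-scan per hunk."""
--     by_span = sorted(intervals, key=lambda iv: iv[1] - iv[0])
--     out: list[tuple[str, tuple[int, int, str]]] = []
--     for hunk in hunks:
--         hs, he, _ = hunk
--         key = next((k for s, e, k in by_span if s <= hs and he <= e), preamble_key)
--         out.append((key, hunk))
--     return out
-- ===== Notes on version B (the rewrite author's own statement) =====
-- stated objective: alternative
-- what changed: Replaced the per-hunk minimum-span scan by a single stable sort of the intervals by span, after which each hunk just takes the FIRST containing interval (early exit); stability of the sort reproduces A's first-occurrence tie-break exactly.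
import Mathlib
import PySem

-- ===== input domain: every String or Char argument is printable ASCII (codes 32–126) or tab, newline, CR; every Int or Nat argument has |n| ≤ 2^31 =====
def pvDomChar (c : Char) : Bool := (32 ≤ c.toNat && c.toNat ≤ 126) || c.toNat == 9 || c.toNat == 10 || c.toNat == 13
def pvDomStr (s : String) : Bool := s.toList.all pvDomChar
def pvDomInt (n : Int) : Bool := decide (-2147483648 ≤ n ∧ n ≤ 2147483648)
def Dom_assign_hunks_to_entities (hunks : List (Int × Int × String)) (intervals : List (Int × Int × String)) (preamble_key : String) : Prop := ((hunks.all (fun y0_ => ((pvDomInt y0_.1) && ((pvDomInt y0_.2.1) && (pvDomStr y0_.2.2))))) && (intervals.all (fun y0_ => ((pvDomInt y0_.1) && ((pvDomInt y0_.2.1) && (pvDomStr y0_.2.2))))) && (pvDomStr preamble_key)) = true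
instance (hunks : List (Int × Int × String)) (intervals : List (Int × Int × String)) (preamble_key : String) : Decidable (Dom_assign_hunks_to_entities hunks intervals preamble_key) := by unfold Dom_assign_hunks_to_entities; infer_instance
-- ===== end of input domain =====

-- B sorts the intervals once by span (stable) and takes each hunk's first containing
-- interval, instead of A's per-hunk min-span rescan (objective: alternative, same worst-case cost).


-- ===== PORT A =====
-- inner-loop body of A: update (best, best_range) with one interval
def pvBestA (hs he : Int) (st : Option (Int × Int × String) × Option Int) (iv : Int × Int × String) :
    Option (Int × Int × String) × Option Int :=
  if iv.1 ≤ hs ∧ he ≤ iv.2.1 then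
    let span := iv.2.1 - iv.1
    match st.2 with
    | none => (some (iv.1, iv.2.1, iv.2.2), some span)
    | some br => if span < br then (some (iv.1, iv.2.1, iv.2.2), some span) else st
  else st

def assign_hunks_to_entities (hunks : List (Int × Int × String)) (intervals : List (Int × Int × String)) (preamble_key : String) : List (String × (Int × Int × String)) :=
  hunks.foldl (fun out hunk =>
    let best := intervals.foldl (pvBestA hunk.1 hunk.2.1) (none, none)
    match best.1 with
    | none => out ++ [(preamble_key, hunk)]
    | some b => out ++ [(b.2.2, hunk)]) []

-- ===== PORT B =====
-- B's sort key: the span of an interval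
def pvSpan (iv : Int × Int × String) : Int := iv.2.1 - iv.1
-- B's containment test of a hunk h in an interval iv
def pvContains (h iv : Int × Int × String) : Bool := decide (iv.1 ≤ h.1 ∧ h.2.1 ≤ iv.2.1)

-- stable sort of the intervals by span, then first containing interval per hunk
def assign_hunks_to_entities_alt (hunks : List (Int × Int × String)) (intervals : List (Int × Int × String)) (preamble_key : String) : List (String × (Int × Int × String)) :=
  let bySpan := PySem.List.sorted intervals pvSpan
  hunks.foldr (fun hunk out =>
    (match bySpan.find? (pvContains hunk) with
     | none => preamble_key
     | some iv => iv.2.2, hunk) :: out) []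

-- ===== PRECONDITION & SPEC =====
def Spec_assign_hunks_to_entities (hunks : List (Int × Int × String)) (intervals : List (Int × Int × String)) (preamble_key : String) (out : List (String × (Int × Int × String))) : Prop := out = assign_hunks_to_entities_alt hunks intervals preamble_key
instance (hunks : List (Int × Int × String)) (intervals : List (Int × Int × String)) (preamble_key : String) (out : List (String × (Int × Int × String))) : Decidable (Spec_assign_hunks_to_entities hunks intervals preamble_key out) := by unfold Spec_assign_hunks_to_entities; infer_instance

-- ===== CLAIM (what is proved, stated in full; the proofs are below) =====
def Claim_equal_assign_hunks_to_entities : Prop := ∀ (hunks : List (Int × Int × String)) (intervals : List (Int × Int × String)) (preamble_key : String), Dom_assign_hunks_to_entities hunks intervals preamble_key → Spec_assign_hunks_to_entities hunks intervals preamble_key (assign_hunks_to_entities hunks intervals preamble_key)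

-- ===== LEMMAS AND PROOFS =====

-- the "keep the first strict-min containing interval" step both programs compute
def pvG (h : Int × Int × String) (o : Option (Int × Int × String)) (x : Int × Int × String) :
    Option (Int × Int × String) :=
  if pvContains h x then
    match o with
    | none => some x
    | some y => if pvSpan x < pvSpan y then some x else some y
  else o

-- A's inner fold is the pvG fold (the tracked best_range is the span of best)
theorem foldA_eq (h : Int × Int × String) (ivs : List (Int × Int × String))
    (o : Option (Int × Int × String)) :
    ivs.foldl (pvBestA h.1 h.2.1) (o, o.map pvSpan)
      = (ivs.foldl (pvG h) o, (ivs.foldl (pvG h) o).map pvSpan) := by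
  induction ivs generalizing o with
  | nil => rfl
  | cons iv ivs ih =>
    have hstep : pvBestA h.1 h.2.1 (o, o.map pvSpan) iv = (pvG h o iv, (pvG h o iv).map pvSpan) := by
      rcases o with _ | y <;>
        simp only [pvBestA, pvG, pvContains, pvSpan, Option.map_none, Option.map_some,
          decide_eq_true_eq] <;> split_ifs <;> rfl
    simp only [List.foldl_cons, hstep, ih]

-- first containing interval after inserting x into a span-sorted list = pvG of the old first
theorem find_insertBy (h x : Int × Int × String) (s : List (Int × Int × String))
    (hs : s.Pairwise (fun a b => pvSpan a ≤ pvSpan b)) :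
    (PySem.List.insertBy (fun a b => decide (pvSpan a < pvSpan b)) x s).find? (pvContains h)
      = pvG h (s.find? (pvContains h)) x := by
  induction s with
  | nil =>
    simp only [PySem.List.insertBy, List.find?, pvG]
    cases hP : pvContains h x <;> simp
  | cons y ys ih =>
    have hys : ys.Pairwise (fun a b => pvSpan a ≤ pvSpan b) := hs.tail
    have hhead : ∀ z ∈ ys, pvSpan y ≤ pvSpan z := fun z hz => (List.pairwise_cons.mp hs).1 z hz
    simp only [PySem.List.insertBy]
    by_cases hb : pvSpan x < pvSpan y
    · simp only [hb, decide_true, if_true, List.find?]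
      cases hP : pvContains h x with
      | true =>
        -- x containing and strictly smaller span than anything in y::ys
        cases hfy : (y :: ys).find? (pvContains h) with
        | none =>
          simp only [List.find?] at hfy
          simp [hfy, pvG, hP]
        | some z =>
          have hz : z ∈ y :: ys := List.mem_of_find?_eq_some hfy
          have hyz : pvSpan y ≤ pvSpan z := by
            rcases List.mem_cons.mp hz with rfl | hz'
            · exact le_refl _
            · exact hhead z hz'
          simp only [List.find?] at hfy ⊢
          simp [hfy, pvG, hP, lt_of_lt_of_le hb hyz]
      | false =>
        simp only [hP, pvG]
        cases hfy : (y :: ys).find? (pvContains h) <;> simp_all [List.find?]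
    · simp only [hb, decide_false, Bool.false_eq_true, if_false, List.find?]
      cases hPy : pvContains h y with
      | true => simp [pvG, hb]
      | false => simp only [ih hys]

-- first containing interval in the span-sorted list = the pvG fold over the original order
theorem find_sorted_eq (h : Int × Int × String) (l : List (Int × Int × String)) :
    (PySem.List.sorted l pvSpan).find? (pvContains h) = l.foldl (pvG h) none := by
  induction l using List.reverseRecOn with
  | nil => rfl
  | append_singleton l x ih =>
    have hsort : PySem.List.sorted (l ++ [x]) pvSpan
        = PySem.List.insertBy (fun a b => decide (pvSpan a < pvSpan b)) x (PySem.List.sorted l pvSpan) := by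
      rw [PySem.List.sorted_eq_foldl_insertBy, PySem.List.sorted_eq_foldl_insertBy,
        List.foldl_append, List.foldl_cons, List.foldl_nil]
    rw [hsort, find_insertBy h x _ (PySem.List.sorted_pairwise l pvSpan), ih,
      List.foldl_append, List.foldl_cons, List.foldl_nil]

-- A's output accumulator unrolled to a map
theorem A_eq_map (hunks ivs : List (Int × Int × String)) (pk : String)
    (acc : List (String × (Int × Int × String))) :
    hunks.foldl (fun out hunk =>
      let best := ivs.foldl (pvBestA hunk.1 hunk.2.1) (none, none)
      match best.1 with
      | none => out ++ [(pk, hunk)]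
      | some b => out ++ [(b.2.2, hunk)]) acc
    = acc ++ hunks.map (fun h =>
        (match ivs.foldl (pvG h) none with
         | none => pk
         | some b => b.2.2, h)) := by
  induction hunks generalizing acc with
  | nil => simp
  | cons h hs ih =>
    have hfold : (ivs.foldl (pvBestA h.1 h.2.1) (none, none)).1 = ivs.foldl (pvG h) none := by
      have := foldA_eq h ivs none
      simp only [Option.map_none] at this
      rw [this]
    simp only [List.foldl_cons, List.map_cons, ih]
    rcases hb : ivs.foldl (pvG h) none with _ | b <;> simp [hfold, hb]

-- B's foldr is a map
theorem B_eq_map (hunks ivs : List (Int × Int × String)) (pk : String) :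
    assign_hunks_to_entities_alt hunks ivs pk
      = hunks.map (fun h =>
          (match (PySem.List.sorted ivs pvSpan).find? (pvContains h) with
           | none => pk
           | some iv => iv.2.2, h)) := by
  induction hunks with
  | nil => rfl
  | cons h hs ih => simp only [assign_hunks_to_entities_alt, List.foldr_cons, List.map_cons] at ih ⊢; rw [ih]

-- ===== VERDICT (by name: the statement is the Claim_ definition above) =====
theorem assign_hunks_to_entities_spec : Claim_equal_assign_hunks_to_entities := by
  intro hunks intervals pk _
  show _ = _
  rw [B_eq_map, assign_hunks_to_entities, A_eq_map]
  simp only [find_sorted_eq]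
  simp
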